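-- pv_equiv track=rewrite | github.com/mariiio/rally-cut | analysis/scripts/diagnose_rally0_anchor.py | _find_best_permutation
-- ===== SOURCE A (Python) =====
-- import itertools
--
-- def _find_best_permutation(
--     gt_rallies: dict[str, dict[str, int]],
--     pred_rallies: dict[str, dict[str, int]],
-- ) -> dict[int, int]:
--     """Global 4-permutation pred_pid→gt_pid (same as 7a/7b scripts)."""
--     player_ids = [1, 2, 3, 4]
--     best_perm: dict[int, int] = {pid: pid for pid in player_ids}
--     best_c = -1
--     for perm in itertools.permutations(player_ids):
--         pm = {pid: gt for pid, gt in zip(player_ids, perm)}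
--         c = 0
--         for rid, gt_map in gt_rallies.items():
--             if rid not in pred_rallies:
--                 continue
--             pred_map = pred_rallies[rid]
--             for tid in gt_map:
--                 if tid in pred_map and pm.get(pred_map[tid]) == gt_map[tid]:
--                     c += 1
--         if c > best_c:
--             best_c = c
--             best_perm = pm
--     return best_perm
-- ===== SOURCE B (Python) =====
-- def _find_best_permutation(
--     gt_rallies: dict[str, dict[str, int]],
--     pred_rallies: dict[str, dict[str, int]],
-- ) -> dict[int, int]:
--     """One pass over the tiles fills a 4x4 co-occurrence count matrix
--     (pred_pid row, gt_pid column); each of the 24 permutations, generated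
--     recursively, is then scored as a sum of four matrix cells."""
--     mat = [[0] * 4 for _ in range(4)]
--     for rid, gt_map in gt_rallies.items():
--         pred_map = pred_rallies.get(rid)
--         if pred_map is None:
--             continue
--         for tid, g in gt_map.items():
--             p = pred_map.get(tid)
--             if p is not None and 1 <= p <= 4 and 1 <= g <= 4:
--                 mat[p - 1][g - 1] += 1
--
--     def perms(rem):
--         if not rem:
--             return [()]
--         return [(x,) + r for x in rem for r in perms([y for y in rem if y != x])]
--
--     best = max(perms([1, 2, 3, 4]),
--                key=lambda perm: sum(mat[i][perm[i] - 1] for i in range(4)))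
--     return {i + 1: best[i] for i in range(4)}
-- ===== Notes on version B (the rewrite author's own statement) =====
-- stated objective: faster
-- what changed: Instead of rescanning every rally's tiles for each of the 24 permutations, B fills a fixed 4x4 pred-gt co-occurrence count matrix in one pass over the data, generates the permutations recursively, and scores each as a sum of four matrix cells picked by max(key=...).
import Mathlib
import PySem

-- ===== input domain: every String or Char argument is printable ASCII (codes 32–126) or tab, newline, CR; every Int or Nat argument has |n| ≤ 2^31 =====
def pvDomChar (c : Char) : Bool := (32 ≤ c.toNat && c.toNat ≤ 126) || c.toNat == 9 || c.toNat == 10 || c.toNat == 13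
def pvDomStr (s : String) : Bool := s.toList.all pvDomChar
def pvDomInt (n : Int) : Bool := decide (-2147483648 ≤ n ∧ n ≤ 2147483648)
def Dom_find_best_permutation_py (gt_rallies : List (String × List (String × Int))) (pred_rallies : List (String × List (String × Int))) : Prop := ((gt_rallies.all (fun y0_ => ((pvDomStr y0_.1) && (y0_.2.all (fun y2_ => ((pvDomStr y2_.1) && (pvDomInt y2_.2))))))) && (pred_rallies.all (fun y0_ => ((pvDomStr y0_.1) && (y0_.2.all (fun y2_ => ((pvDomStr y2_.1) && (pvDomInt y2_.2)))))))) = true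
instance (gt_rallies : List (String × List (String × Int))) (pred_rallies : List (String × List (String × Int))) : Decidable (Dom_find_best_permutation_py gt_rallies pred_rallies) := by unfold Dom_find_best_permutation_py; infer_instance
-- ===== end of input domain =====

-- B replaces A's 24 full scans of the tile data by ONE pass filling a 4×4
-- pred→gt co-occurrence count matrix; the permutations are generated recursively
-- and scored as sums of four matrix cells (objective: faster).

def pvPlayerIds : List Int := [1, 2, 3, 4]

-- ===== PORT A =====
-- A's per-permutation count: for each gt rally present in pred, for each tile of its
-- gt_map, +1 when pm.get(pred_map[tid]) == gt_map[tid].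
def pvCountA (pm : PySem.Dict Int Int) (gt_rallies : List (String × List (String × Int))) (pred_rallies : List (String × List (String × Int))) : Int :=
  gt_rallies.foldl (fun c rt =>
    match (PySem.Dict.mk pred_rallies).get? rt.1 with
    | none => c
    | some pred_map =>
      rt.2.foldl (fun c tv =>
        match (PySem.Dict.mk pred_map).get? tv.1 with
        | none => c
        | some p => if pm.get? p = some tv.2 then c + 1 else c) c) 0

def find_best_permutation_py (gt_rallies : List (String × List (String × Int))) (pred_rallies : List (String × List (String × Int))) : List (Int × Int) :=
  let r := (PySem.List.permutations pvPlayerIds 4).foldl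
    (fun (st : PySem.Dict Int Int × Int) perm =>
      let pm := PySem.Dict.ofList (List.zip pvPlayerIds perm)
      let c := pvCountA pm gt_rallies pred_rallies
      if c > st.2 then (pm, c) else st)
    (PySem.Dict.ofList (pvPlayerIds.map (fun pid => (pid, pid))), -1)
  r.1.items

-- ===== PORT B =====
-- Source B's mat[p-1][g-1] += 1; the 1 ≤ p,g ≤ 4 guard at the call site keeps the
-- List.set / List.getD indices in range, so this is exact.
def pvBump (mat : List (List Int)) (p g : Int) : List (List Int) :=
  mat.set (p - 1).toNat
    ((mat.getD (p - 1).toNat []).set (g - 1).toNat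
      ((mat.getD (p - 1).toNat []).getD (g - 1).toNat 0 + 1))

-- the single pass that fills mat = [[0]*4 for _ in range(4)]
def pvMatB (gt_rallies : List (String × List (String × Int))) (pred_rallies : List (String × List (String × Int))) : List (List Int) :=
  gt_rallies.foldl (fun mat rt =>
    match (PySem.Dict.mk pred_rallies).get? rt.1 with
    | none => mat
    | some pred_map =>
      rt.2.foldl (fun mat (tv : String × Int) =>
        match (PySem.Dict.mk pred_map).get? tv.1 with
        | none => mat
        | some p =>
          if 1 ≤ p ∧ p ≤ 4 ∧ 1 ≤ tv.2 ∧ tv.2 ≤ 4 then pvBump mat p tv.2 else mat) mat)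
    (List.replicate 4 (List.replicate 4 (0 : Int)))

-- Source B's recursive perms(rem); the fuel argument only makes the recursion structural
-- (it is called with fuel = rem.length, which the recursion never exhausts early).
def pvPermsB : Nat → List Int → List (List Int)
  | 0, _ => [[]]
  | fuel + 1, rem =>
    if rem.isEmpty then [[]]
    else rem.flatMap (fun x => (pvPermsB fuel (rem.filter (fun y => y ≠ x))).map (fun r => x :: r))

-- sum(mat[i][perm[i] - 1] for i in range(4)); indices in range for the 24 permutations
def pvScoreB (mat : List (List Int)) (perm : List Int) : Int :=
  ((List.range 4).map (fun i => (mat.getD i []).getD ((perm.getD i 0) - 1).toNat 0)).sum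

def find_best_permutation_py_alt (gt_rallies : List (String × List (String × Int))) (pred_rallies : List (String × List (String × Int))) : List (Int × Int) :=
  let mat := pvMatB gt_rallies pred_rallies
  let best := PySem.List.maxD (pvPermsB 4 [1, 2, 3, 4]) (fun perm => pvScoreB mat perm) []
  (List.range 4).map (fun (i : Nat) => ((i : Int) + 1, best.getD i 0))

-- ===== PRECONDITION & SPEC =====
def Spec_find_best_permutation_py (gt_rallies : List (String × List (String × Int))) (pred_rallies : List (String × List (String × Int))) (out : List (Int × Int)) : Prop := out = find_best_permutation_py_alt gt_rallies pred_rallies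
instance (gt_rallies : List (String × List (String × Int))) (pred_rallies : List (String × List (String × Int))) (out : List (Int × Int)) : Decidable (Spec_find_best_permutation_py gt_rallies pred_rallies out) := by unfold Spec_find_best_permutation_py; infer_instance

-- ===== CLAIM (what is proved, stated in full; the proofs are below) =====
def Claim_equal_find_best_permutation_py : Prop := ∀ (gt_rallies : List (String × List (String × Int))) (pred_rallies : List (String × List (String × Int))), Dom_find_best_permutation_py gt_rallies pred_rallies → Spec_find_best_permutation_py gt_rallies pred_rallies (find_best_permutation_py gt_rallies pred_rallies)

-- ===== LEMMAS AND PROOFS =====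

-- a 4×4 matrix of Ints, as the explicit entries
def pvShape (mat : List (List Int)) : Prop :=
  ∃ a0 a1 a2 a3 b0 b1 b2 b3 c0 c1 c2 c3 d0 d1 d2 d3 : Int,
    mat = [[a0,a1,a2,a3],[b0,b1,b2,b3],[c0,c1,c2,c3],[d0,d1,d2,d3]]

theorem pv_get_pm (q1 q2 q3 q4 p : Int) :
    (PySem.Dict.ofList (List.zip pvPlayerIds [q1,q2,q3,q4])).get? p =
      if p = 4 then some q4 else if p = 3 then some q3 else
      if p = 2 then some q2 else if p = 1 then some q1 else none := by
  simp only [pvPlayerIds, List.zip, List.zipWith, PySem.Dict.ofList, PySem.Dict.update, List.foldl]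
  rw [PySem.Dict.get?_insert, PySem.Dict.get?_insert, PySem.Dict.get?_insert,
    PySem.Dict.get?_insert]
  simp [PySem.Dict.get?_empty]

-- the get? of the permutation dict never hits outside the 1..4 × 1..4 box
theorem pv_pm_none (p g q1 q2 q3 q4 : Int)
    (hq : 1 ≤ q1 ∧ q1 ≤ 4 ∧ 1 ≤ q2 ∧ q2 ≤ 4 ∧ 1 ≤ q3 ∧ q3 ≤ 4 ∧ 1 ≤ q4 ∧ q4 ≤ 4)
    (hg : ¬ (1 ≤ p ∧ p ≤ 4 ∧ 1 ≤ g ∧ g ≤ 4)) :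
    ¬ (PySem.Dict.ofList (List.zip pvPlayerIds [q1,q2,q3,q4])).get? p = some g := by
  rw [pv_get_pm]
  obtain ⟨a1, a2, a3, a4, a5, a6, a7, a8⟩ := hq
  split_ifs with e4 e3 e2 e1 <;> simp <;> intro hEq <;>
    exact hg ⟨by omega, by omega, by omega, by omega⟩

-- reading a 4-row after the in-place += 1 at column g-1
theorem pv_read_bump (x0 x1 x2 x3 : Int) (g q : Int)
    (hg1 : 1 ≤ g) (hg2 : g ≤ 4) (hq1 : 1 ≤ q) (hq2 : q ≤ 4) :
    (([x0,x1,x2,x3].set (g.toNat - 1) ([x0,x1,x2,x3][g.toNat - 1]?.getD 0 + 1))[q.toNat - 1]?.getD 0)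
      = [x0,x1,x2,x3][q.toNat - 1]?.getD 0 + (if q = g then 1 else 0) := by
  interval_cases g <;> interval_cases q <;>
    norm_num [show Int.toNat 1 = 1 from rfl, show Int.toNat 2 = 2 from rfl,
      show Int.toNat 3 = 3 from rfl, show Int.toNat 4 = 4 from rfl,
      List.set_cons_succ, List.set_cons_zero, List.getElem?_cons_succ, List.getElem?_cons_zero]

-- one tile's effect on a permutation's score
theorem pv_bump_score (mat : List (List Int)) (hS : pvShape mat) (p g q1 q2 q3 q4 : Int)
    (hq : 1 ≤ q1 ∧ q1 ≤ 4 ∧ 1 ≤ q2 ∧ q2 ≤ 4 ∧ 1 ≤ q3 ∧ q3 ≤ 4 ∧ 1 ≤ q4 ∧ q4 ≤ 4) :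
    pvScoreB (if 1 ≤ p ∧ p ≤ 4 ∧ 1 ≤ g ∧ g ≤ 4 then pvBump mat p g else mat) [q1,q2,q3,q4]
      = pvScoreB mat [q1,q2,q3,q4]
        + (if (PySem.Dict.ofList (List.zip pvPlayerIds [q1,q2,q3,q4])).get? p = some g
           then 1 else 0) := by
  obtain ⟨a1, a2, a3, a4, a5, a6, a7, a8⟩ := hq
  by_cases hpg : 1 ≤ p ∧ p ≤ 4 ∧ 1 ≤ g ∧ g ≤ 4
  · obtain ⟨_, _, _, _, _, _, _, _, _, _, _, _, _, _, _, _, rfl⟩ := hS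
    rw [if_pos hpg, pv_get_pm]
    obtain ⟨hp1, hp2, hg1, hg2⟩ := hpg
    interval_cases p <;>
      simp only [pvBump, pvScoreB, List.range_succ, List.range_zero, List.getD] <;>
      norm_num [show Int.toNat 0 = 0 from rfl, show Int.toNat 1 = 1 from rfl,
        show Int.toNat 2 = 2 from rfl, show Int.toNat 3 = 3 from rfl,
        List.set_cons_succ, List.set_cons_zero,
        List.getElem?_cons_succ, List.getElem?_cons_zero] <;>
      [rw [pv_read_bump _ _ _ _ g q1 hg1 hg2 a1 a2];
       rw [pv_read_bump _ _ _ _ g q2 hg1 hg2 a3 a4];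
       rw [pv_read_bump _ _ _ _ g q3 hg1 hg2 a5 a6];
       rw [pv_read_bump _ _ _ _ g q4 hg1 hg2 a7 a8]] <;>
      ring
  · rw [if_neg hpg, if_neg (pv_pm_none p g q1 q2 q3 q4 ⟨a1,a2,a3,a4,a5,a6,a7,a8⟩ hpg)]
    ring

theorem pv_shape_bump (mat : List (List Int)) (hS : pvShape mat) (p g : Int)
    (hpg : 1 ≤ p ∧ p ≤ 4 ∧ 1 ≤ g ∧ g ≤ 4) : pvShape (pvBump mat p g) := by
  obtain ⟨_, _, _, _, _, _, _, _, _, _, _, _, _, _, _, _, rfl⟩ := hS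
  obtain ⟨hp1, hp2, hg1, hg2⟩ := hpg
  interval_cases p <;> interval_cases g <;>
    exact ⟨_, _, _, _, _, _, _, _, _, _, _, _, _, _, _, _, rfl⟩

-- tile-loop invariant: A's running count and B's matrix advance in lockstep
theorem pv_tiles (pred_map : List (String × Int)) (q1 q2 q3 q4 : Int)
    (hq : 1 ≤ q1 ∧ q1 ≤ 4 ∧ 1 ≤ q2 ∧ q2 ≤ 4 ∧ 1 ≤ q3 ∧ q3 ≤ 4 ∧ 1 ≤ q4 ∧ q4 ≤ 4) :
    ∀ (tiles : List (String × Int)) (acc : Int) (mat : List (List Int)), pvShape mat →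
    pvShape (tiles.foldl (fun mat (tv : String × Int) =>
        match (PySem.Dict.mk pred_map).get? tv.1 with
        | none => mat
        | some p => if 1 ≤ p ∧ p ≤ 4 ∧ 1 ≤ tv.2 ∧ tv.2 ≤ 4 then pvBump mat p tv.2 else mat) mat)
    ∧ (tiles.foldl (fun c tv =>
        match (PySem.Dict.mk pred_map).get? tv.1 with
        | none => c
        | some p => if (PySem.Dict.ofList (List.zip pvPlayerIds [q1,q2,q3,q4])).get? p = some tv.2 then c + 1 else c) acc)
        + pvScoreB mat [q1,q2,q3,q4]
      = acc + pvScoreB (tiles.foldl (fun mat (tv : String × Int) =>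
        match (PySem.Dict.mk pred_map).get? tv.1 with
        | none => mat
        | some p => if 1 ≤ p ∧ p ≤ 4 ∧ 1 ≤ tv.2 ∧ tv.2 ≤ 4 then pvBump mat p tv.2 else mat) mat) [q1,q2,q3,q4] := by
  intro tiles
  induction tiles with
  | nil => intro acc mat hS; exact ⟨hS, by simp⟩
  | cons tv tl ih =>
    intro acc mat hS
    simp only [List.foldl_cons]
    cases hp : (PySem.Dict.mk pred_map).get? tv.1 with
    | none => exact ih acc mat hS
    | some p =>
      dsimp only
      by_cases hg : 1 ≤ p ∧ p ≤ 4 ∧ 1 ≤ tv.2 ∧ tv.2 ≤ 4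
      · rw [if_pos hg]
        have hbs := pv_bump_score mat hS p tv.2 q1 q2 q3 q4 hq
        rw [if_pos hg] at hbs
        obtain ⟨ihS, ihEq⟩ := ih
          (acc + (if (PySem.Dict.ofList (List.zip pvPlayerIds [q1,q2,q3,q4])).get? p = some tv.2 then 1 else 0))
          (pvBump mat p tv.2) (pv_shape_bump mat hS p tv.2 hg)
        refine ⟨ihS, ?_⟩
        have hacc : (if (PySem.Dict.ofList (List.zip pvPlayerIds [q1,q2,q3,q4])).get? p = some tv.2 then acc + 1 else acc)
            = acc + (if (PySem.Dict.ofList (List.zip pvPlayerIds [q1,q2,q3,q4])).get? p = some tv.2 then 1 else 0) := by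
          split_ifs <;> ring
        rw [hacc]
        linarith [ihEq, hbs]
      · rw [if_neg hg, if_neg (pv_pm_none p tv.2 q1 q2 q3 q4 hq hg)]
        exact ih acc mat hS

-- rally-loop invariant
theorem pv_rallies (gt_rallies pred_rallies : List (String × List (String × Int)))
    (q1 q2 q3 q4 : Int)
    (hq : 1 ≤ q1 ∧ q1 ≤ 4 ∧ 1 ≤ q2 ∧ q2 ≤ 4 ∧ 1 ≤ q3 ∧ q3 ≤ 4 ∧ 1 ≤ q4 ∧ q4 ≤ 4) :
    ∀ (acc : Int) (mat : List (List Int)), pvShape mat →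
    pvShape (gt_rallies.foldl (fun mat rt =>
        match (PySem.Dict.mk pred_rallies).get? rt.1 with
        | none => mat
        | some pred_map =>
          rt.2.foldl (fun mat (tv : String × Int) =>
            match (PySem.Dict.mk pred_map).get? tv.1 with
            | none => mat
            | some p => if 1 ≤ p ∧ p ≤ 4 ∧ 1 ≤ tv.2 ∧ tv.2 ≤ 4 then pvBump mat p tv.2 else mat) mat) mat)
    ∧ (gt_rallies.foldl (fun c rt =>
        match (PySem.Dict.mk pred_rallies).get? rt.1 with
        | none => c
        | some pred_map =>
          rt.2.foldl (fun c tv =>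
            match (PySem.Dict.mk pred_map).get? tv.1 with
            | none => c
            | some p => if (PySem.Dict.ofList (List.zip pvPlayerIds [q1,q2,q3,q4])).get? p = some tv.2 then c + 1 else c) c) acc)
        + pvScoreB mat [q1,q2,q3,q4]
      = acc + pvScoreB (gt_rallies.foldl (fun mat rt =>
        match (PySem.Dict.mk pred_rallies).get? rt.1 with
        | none => mat
        | some pred_map =>
          rt.2.foldl (fun mat (tv : String × Int) =>
            match (PySem.Dict.mk pred_map).get? tv.1 with
            | none => mat
            | some p => if 1 ≤ p ∧ p ≤ 4 ∧ 1 ≤ tv.2 ∧ tv.2 ≤ 4 then pvBump mat p tv.2 else mat) mat) mat) [q1,q2,q3,q4] := by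
  induction gt_rallies with
  | nil => intro acc mat hS; exact ⟨hS, by simp⟩
  | cons rt tl ih =>
    intro acc mat hS
    simp only [List.foldl_cons]
    cases hp : (PySem.Dict.mk pred_rallies).get? rt.1 with
    | none => exact ih acc mat hS
    | some pred_map =>
      dsimp only
      obtain ⟨tS, tEq⟩ := pv_tiles pred_map q1 q2 q3 q4 hq rt.2 acc mat hS
      obtain ⟨ihS, ihEq⟩ := ih
        (rt.2.foldl (fun c tv =>
          match (PySem.Dict.mk pred_map).get? tv.1 with
          | none => c
          | some p => if (PySem.Dict.ofList (List.zip pvPlayerIds [q1,q2,q3,q4])).get? p = some tv.2 then c + 1 else c) acc)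
        (rt.2.foldl (fun mat (tv : String × Int) =>
          match (PySem.Dict.mk pred_map).get? tv.1 with
          | none => mat
          | some p => if 1 ≤ p ∧ p ≤ 4 ∧ 1 ≤ tv.2 ∧ tv.2 ≤ 4 then pvBump mat p tv.2 else mat) mat)
        tS
      exact ⟨ihS, by linarith [tEq, ihEq]⟩

-- the all-zero matrix scores 0 for every permutation
theorem pv_score_zero (q1 q2 q3 q4 : Int) :
    pvScoreB (List.replicate 4 (List.replicate 4 (0 : Int))) [q1,q2,q3,q4] = 0 := by
  have h : ∀ n : Nat, (([ (0:Int), 0, 0, 0])[n]?.getD 0) = 0 := by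
    intro n; rcases n with _|_|_|_|n <;> simp
  simp only [pvScoreB, List.range_succ, List.range_zero, List.getD, List.replicate]
  simp [h]

-- A's per-permutation scan equals B's score of the matrix
theorem pv_count_eq (gt_rallies pred_rallies : List (String × List (String × Int)))
    (q1 q2 q3 q4 : Int)
    (hq : 1 ≤ q1 ∧ q1 ≤ 4 ∧ 1 ≤ q2 ∧ q2 ≤ 4 ∧ 1 ≤ q3 ∧ q3 ≤ 4 ∧ 1 ≤ q4 ∧ q4 ≤ 4) :
    pvCountA (PySem.Dict.ofList (List.zip pvPlayerIds [q1,q2,q3,q4])) gt_rallies pred_rallies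
      = pvScoreB (pvMatB gt_rallies pred_rallies) [q1,q2,q3,q4] := by
  have hS : pvShape (List.replicate 4 (List.replicate 4 (0 : Int))) :=
    ⟨0,0,0,0,0,0,0,0,0,0,0,0,0,0,0,0, rfl⟩
  obtain ⟨_, hEq⟩ := pv_rallies gt_rallies pred_rallies q1 q2 q3 q4 hq 0
    (List.replicate 4 (List.replicate 4 (0 : Int))) hS
  rw [pv_score_zero] at hEq
  simpa [pvCountA, pvMatB] using hEq

-- folds that only ever grow stay above their start
theorem pv_foldl_ge {α : Type} (step : Int → α → Int) (h : ∀ c x, c ≤ step c x) :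
    ∀ (l : List α) (acc : Int), acc ≤ l.foldl step acc := by
  intro l
  induction l with
  | nil => intro acc; exact le_refl acc
  | cons x t ih => intro acc; exact le_trans (h acc x) (ih (step acc x))

theorem pv_countA_nonneg (pm : PySem.Dict Int Int)
    (gt_rallies pred_rallies : List (String × List (String × Int))) :
    0 ≤ pvCountA pm gt_rallies pred_rallies := by
  refine pv_foldl_ge _ (fun c rt => ?_) gt_rallies 0
  cases (PySem.Dict.mk pred_rallies).get? rt.1 with
  | none => exact le_refl c
  | some pred_map =>
    refine pv_foldl_ge _ (fun c tv => ?_) rt.2 c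
    cases (PySem.Dict.mk pred_map).get? tv.1 with
    | none => exact le_refl c
    | some p => dsimp only; split_ifs <;> omega

-- Python's max(xs, key=f) and A's strict-improvement fold pick the SAME (first)
-- maximal permutation: one induction relating both folds
theorem pv_sel_max (mat : List (List Int)) :
    ∀ (t : List (List Int)) (m : List Int),
    ∃ M : List Int,
      PySem.List.max? (m :: t) (fun perm => pvScoreB mat perm) = some M
      ∧ (t.foldl (fun (st : PySem.Dict Int Int × Int) perm =>
            if pvScoreB mat perm > st.2
            then (PySem.Dict.ofList (pvPlayerIds.zip perm), pvScoreB mat perm) else st)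
          (PySem.Dict.ofList (pvPlayerIds.zip m), pvScoreB mat m))
        = (PySem.Dict.ofList (pvPlayerIds.zip M), pvScoreB mat M)
      ∧ M ∈ m :: t := by
  intro t
  induction t with
  | nil =>
    intro m
    exact ⟨m, rfl, rfl, by simp⟩
  | cons p t ih =>
    intro m
    obtain ⟨M, h1, h2, h3⟩ := ih (if pvScoreB mat m < pvScoreB mat p then p else m)
    refine ⟨M, ?_, ?_, ?_⟩
    · rw [← h1]
      simp only [PySem.List.max?, List.foldl_cons]
      congr 1
      show (if pvScoreB mat m < pvScoreB mat p then some p else some m)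
        = some (if pvScoreB mat m < pvScoreB mat p then p else m)
      split_ifs <;> rfl
    · rw [← h2]
      simp only [List.foldl_cons]
      congr 1
      show (if pvScoreB mat m < pvScoreB mat p
            then (PySem.Dict.ofList (pvPlayerIds.zip p), pvScoreB mat p)
            else (PySem.Dict.ofList (pvPlayerIds.zip m), pvScoreB mat m))
        = (PySem.Dict.ofList (pvPlayerIds.zip (if pvScoreB mat m < pvScoreB mat p then p else m)),
           pvScoreB mat (if pvScoreB mat m < pvScoreB mat p then p else m))
      split_ifs <;> rfl
    · by_cases hc : pvScoreB mat m < pvScoreB mat p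
      · rw [if_pos hc] at h3
        exact List.mem_cons_of_mem _ h3
      · rw [if_neg hc] at h3
        rcases List.mem_cons.mp h3 with h | h
        · rw [h]; exact List.mem_cons_self
        · exact List.mem_cons_of_mem _ (List.mem_cons_of_mem _ h)

-- every generated permutation is a length-4 arrangement of 1..4
theorem pv_perm_facts :
    ∀ perm ∈ PySem.List.permutations pvPlayerIds 4,
      perm.length = 4 ∧ ∀ q ∈ perm, 1 ≤ q ∧ q ≤ 4 := by decide

-- Source B's recursive generator produces itertools' permutation order
theorem pv_perms_eq : pvPermsB 4 [1, 2, 3, 4] = PySem.List.permutations pvPlayerIds 4 := by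
  decide

-- the returned dict, as items, is B's range-indexed pairing
theorem pv_items_eq :
    ∀ perm ∈ PySem.List.permutations pvPlayerIds 4,
      (PySem.Dict.ofList (List.zip pvPlayerIds perm)).items
        = (List.range 4).map (fun (i : Nat) => ((i : Int) + 1, perm.getD i 0)) := by decide

theorem pv_main (gt_rallies pred_rallies : List (String × List (String × Int))) :
    find_best_permutation_py gt_rallies pred_rallies
      = find_best_permutation_py_alt gt_rallies pred_rallies := by
  unfold find_best_permutation_py find_best_permutation_py_alt
  dsimp only
  have hcong : ∀ (st : PySem.Dict Int Int × Int) (perm : List Int),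
      perm ∈ PySem.List.permutations pvPlayerIds 4 →
      (if pvCountA (PySem.Dict.ofList (pvPlayerIds.zip perm)) gt_rallies pred_rallies > st.2 then
        (PySem.Dict.ofList (pvPlayerIds.zip perm),
         pvCountA (PySem.Dict.ofList (pvPlayerIds.zip perm)) gt_rallies pred_rallies)
       else st)
      = (if pvScoreB (pvMatB gt_rallies pred_rallies) perm > st.2 then
        (PySem.Dict.ofList (pvPlayerIds.zip perm), pvScoreB (pvMatB gt_rallies pred_rallies) perm)
       else st) := by
    intro st perm hm
    obtain ⟨hlen, hb⟩ := pv_perm_facts perm hm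
    rcases perm with _ | ⟨x1, _ | ⟨x2, _ | ⟨x3, _ | ⟨x4, rest⟩⟩⟩⟩
    · simp at hlen
    · simp at hlen
    · simp at hlen
    · simp at hlen
    · have hr : rest = [] := by
        have h0 : rest.length = 0 := by simpa using hlen
        exact List.eq_nil_of_length_eq_zero h0
      subst hr
      obtain ⟨hA1, hA2⟩ := hb x1 (by simp)
      obtain ⟨hB1, hB2⟩ := hb x2 (by simp)
      obtain ⟨hC1, hC2⟩ := hb x3 (by simp)
      obtain ⟨hD1, hD2⟩ := hb x4 (by simp)
      rw [pv_count_eq gt_rallies pred_rallies x1 x2 x3 x4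
        ⟨hA1, hA2, hB1, hB2, hC1, hC2, hD1, hD2⟩]
  rw [PySem.List.foldl_congr_mem _ _ _ _ hcong, pv_perms_eq]
  cases hP : PySem.List.permutations pvPlayerIds 4 with
  | nil => exact absurd hP (by decide)
  | cons x t =>
    have hx : x ∈ PySem.List.permutations pvPlayerIds 4 := by
      rw [hP]; exact List.mem_cons_self
    have hx0 : 0 ≤ pvScoreB (pvMatB gt_rallies pred_rallies) x := by
      obtain ⟨hlen, hb⟩ := pv_perm_facts x hx
      rcases x with _ | ⟨x1, _ | ⟨x2, _ | ⟨x3, _ | ⟨x4, rest⟩⟩⟩⟩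
      · simp at hlen
      · simp at hlen
      · simp at hlen
      · simp at hlen
      · have hr : rest = [] := by
          have h0 : rest.length = 0 := by simpa using hlen
          exact List.eq_nil_of_length_eq_zero h0
        subst hr
        obtain ⟨hA1, hA2⟩ := hb x1 (by simp)
        obtain ⟨hB1, hB2⟩ := hb x2 (by simp)
        obtain ⟨hC1, hC2⟩ := hb x3 (by simp)
        obtain ⟨hD1, hD2⟩ := hb x4 (by simp)
        rw [← pv_count_eq gt_rallies pred_rallies x1 x2 x3 x4
          ⟨hA1, hA2, hB1, hB2, hC1, hC2, hD1, hD2⟩]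
        exact pv_countA_nonneg _ _ _
    simp only [List.foldl_cons]
    rw [if_pos (show pvScoreB (pvMatB gt_rallies pred_rallies) x >
        (PySem.Dict.ofList (pvPlayerIds.map (fun pid => (pid, pid))), (-1 : Int)).2 from
        lt_of_lt_of_le (by norm_num) hx0)]
    obtain ⟨M, hmax, hfold, hM⟩ := pv_sel_max (pvMatB gt_rallies pred_rallies) t x
    rw [hfold]
    unfold PySem.List.maxD
    rw [hmax]
    exact pv_items_eq M (by rw [hP]; exact hM)


-- ===== VERDICT (by name: the statement is the Claim_ definition above) =====

theorem find_best_permutation_py_spec : Claim_equal_find_best_permutation_py := by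
  intro gt_rallies pred_rallies _
  exact pv_main gt_rallies pred_rallies
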